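-- pv_equiv track=rewrite | github.com/ajul/cuda_texture_hash | long_period/long_period.py | selectFactors
-- ===== SOURCE A (Python) =====
-- _primes = [2, 3, 5, 7, 11, 13, 17, 19, 23, 29, 31, 37, 41, 43, 47, 53, 59, 61,
--            67, 71, 73, 79, 83, 89, 97, 101, 103, 107, 109, 113, 127, 131, 137,
--            139, 149, 151, 157, 163, 167, 173, 179, 181, 191, 193, 197, 199,
--            211, 223, 227, 229, 233, 239, 241, 251, 257, 263, 269, 271, 277,
--            281, 283, 293, 307, 311, 313, 317, 331, 337, 347, 349, 353, 359,
--            367, 373, 379, 383, 389, 397, 401, 409, 419, 421, 431, 433, 439,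
--            443, 449, 457, 461, 463, 467, 479, 487, 491, 499, 503, 509, 521,
--            523, 541, 547, 557, 563, 569, 571, 577, 587, 593, 599, 601, 607,
--            613, 617, 619, 631, 641, 643, 647, 653, 659, 661, 673, 677, 683,
--            691, 701, 709, 719, 727, 733, 739, 743, 751, 757, 761, 769, 773,
--            787, 797, 809, 811, 821, 823, 827, 829, 839, 853, 857, 859, 863,
--            877, 881, 883, 887, 907, 911, 919, 929, 937, 941, 947, 953, 967,
--            971, 977, 983, 991, 997, 1009, 1013, 1019, 1021]
--
-- def selectFactors(outputRange, factorCount):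
--     aboveCount = factorCount // 2
--     belowCount = factorCount - aboveCount
--     for primeIndex, prime in enumerate(_primes):
--         if prime == outputRange:
--             return (_primes[(primeIndex-belowCount):primeIndex] +
--                     [outputRange] +
--                     _primes[(primeIndex+1):(primeIndex+aboveCount+1)])
--         elif prime > outputRange:
--             return (_primes[(primeIndex-belowCount):primeIndex] +
--                     [outputRange] +
--                     _primes[primeIndex:(primeIndex+aboveCount)])
-- ===== SOURCE B (Python) =====
-- _primes = [2, 3, 5, 7, 11, 13, 17, 19, 23, 29, 31, 37, 41, 43, 47, 53, 59, 61,
--            67, 71, 73, 79, 83, 89, 97, 101, 103, 107, 109, 113, 127, 131, 137,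
--            139, 149, 151, 157, 163, 167, 173, 179, 181, 191, 193, 197, 199,
--            211, 223, 227, 229, 233, 239, 241, 251, 257, 263, 269, 271, 277,
--            281, 283, 293, 307, 311, 313, 317, 331, 337, 347, 349, 353, 359,
--            367, 373, 379, 383, 389, 397, 401, 409, 419, 421, 431, 433, 439,
--            443, 449, 457, 461, 463, 467, 479, 487, 491, 499, 503, 509, 521,
--            523, 541, 547, 557, 563, 569, 571, 577, 587, 593, 599, 601, 607,
--            613, 617, 619, 631, 641, 643, 647, 653, 659, 661, 673, 677, 683,
--            691, 701, 709, 719, 727, 733, 739, 743, 751, 757, 761, 769, 773,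
--            787, 797, 809, 811, 821, 823, 827, 829, 839, 853, 857, 859, 863,
--            877, 881, 883, 887, 907, 911, 919, 929, 937, 941, 947, 953, 967,
--            971, 977, 983, 991, 997, 1009, 1013, 1019, 1021]
--
-- def selectFactors(outputRange, factorCount):
--     # Binary search for the first prime >= outputRange instead of a linear scan.
--     aboveCount = factorCount // 2
--     belowCount = factorCount - aboveCount
--     lo, hi = 0, len(_primes)
--     while lo < hi:
--         mid = (lo + hi) // 2
--         if _primes[mid] < outputRange:
--             lo = mid + 1
--         else:
--             hi = mid
--     if lo == len(_primes):
--         return None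
--     if _primes[lo] == outputRange:
--         return (_primes[(lo - belowCount):lo] +
--                 [outputRange] +
--                 _primes[(lo + 1):(lo + aboveCount + 1)])
--     return (_primes[(lo - belowCount):lo] +
--             [outputRange] +
--             _primes[lo:(lo + aboveCount)])
-- ===== Notes on version B (the rewrite author's own statement) =====
-- stated objective: alternative
-- what changed: Replaces A's linear enumerate-scan of the prime table with a hand-written binary search for the first prime >= outputRange, then builds the same slice expressions from the found index.
-- outside the precondition, e.g. on selectFactors(1022, 4): A returns None, B returns None
import Mathlib
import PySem

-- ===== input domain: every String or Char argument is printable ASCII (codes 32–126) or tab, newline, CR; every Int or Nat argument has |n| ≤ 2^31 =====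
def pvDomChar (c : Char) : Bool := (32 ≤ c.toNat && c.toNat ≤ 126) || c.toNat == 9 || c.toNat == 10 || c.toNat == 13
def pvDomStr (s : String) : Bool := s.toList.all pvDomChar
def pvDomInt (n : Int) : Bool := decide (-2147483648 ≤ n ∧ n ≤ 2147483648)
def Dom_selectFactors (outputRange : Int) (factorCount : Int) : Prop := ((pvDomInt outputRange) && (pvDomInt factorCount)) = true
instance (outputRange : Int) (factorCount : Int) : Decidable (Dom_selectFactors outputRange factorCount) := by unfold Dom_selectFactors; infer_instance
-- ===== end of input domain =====

-- B replaces A's linear scan of the fixed prime table with a binary search for the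
-- first prime ≥ outputRange (alternative algorithm; return values proved equal on Pre_).

def pvPrimes : List Int := [2, 3, 5, 7, 11, 13, 17, 19, 23, 29, 31, 37, 41, 43, 47, 53, 59, 61, 67, 71, 73, 79, 83, 89, 97, 101, 103, 107, 109, 113, 127, 131, 137, 139, 149, 151, 157, 163, 167, 173, 179, 181, 191, 193, 197, 199, 211, 223, 227, 229, 233, 239, 241, 251, 257, 263, 269, 271, 277, 281, 283, 293, 307, 311, 313, 317, 331, 337, 347, 349, 353, 359, 367, 373, 379, 383, 389, 397, 401, 409, 419, 421, 431, 433, 439, 443, 449, 457, 461, 463, 467, 479, 487, 491, 499, 503, 509, 521, 523, 541, 547, 557, 563, 569, 571, 577, 587, 593, 599, 601, 607, 613, 617, 619, 631, 641, 643, 647, 653, 659, 661, 673, 677, 683, 691, 701, 709, 719, 727, 733, 739, 743, 751, 757, 761, 769, 773, 787, 797, 809, 811, 821, 823, 827, 829, 839, 853, 857, 859, 863, 877, 881, 883, 887, 907, 911, 919, 929, 937, 941, 947, 953, 967, 971, 977, 983, 991, 997, 1009, 1013, 1019, 1021]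

-- ===== PORT A =====
def selectFactorsGo (outputRange aboveCount belowCount : Int) : List (Int × Int) → List Int
  | [] => []   -- Python: loop falls off the end, returns None (excluded by Pre_)
  | (primeIndex, prime) :: rest =>
    if prime = outputRange then
      PySem.List.slice pvPrimes (some (primeIndex - belowCount)) (some primeIndex) ++
      [outputRange] ++
      PySem.List.slice pvPrimes (some (primeIndex + 1)) (some (primeIndex + aboveCount + 1))
    else if prime > outputRange then
      PySem.List.slice pvPrimes (some (primeIndex - belowCount)) (some primeIndex) ++
      [outputRange] ++
      PySem.List.slice pvPrimes (some primeIndex) (some (primeIndex + aboveCount))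
    else selectFactorsGo outputRange aboveCount belowCount rest

def selectFactors (outputRange : Int) (factorCount : Int) : List Int :=
  let aboveCount := PySem.Int.floordiv factorCount 2
  let belowCount := factorCount - aboveCount
  selectFactorsGo outputRange aboveCount belowCount (PySem.List.enumerate pvPrimes 0)

-- ===== PORT B =====
-- the while-loop of Source B: binary search for the first index whose prime is ≥ outputRange
def selectFactorsBisect (outputRange : Int) (lo hi : Nat) : Nat :=
  if h : lo < hi then
    if PySem.List.pyGetD pvPrimes (((lo + hi) / 2 : Nat) : Int) 0 < outputRange then
      selectFactorsBisect outputRange ((lo + hi) / 2 + 1) hi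
    else
      selectFactorsBisect outputRange lo ((lo + hi) / 2)
  else lo
termination_by hi - lo
decreasing_by all_goals omega

def selectFactors_alt (outputRange : Int) (factorCount : Int) : List Int :=
  let aboveCount := PySem.Int.floordiv factorCount 2
  let belowCount := factorCount - aboveCount
  let lo := selectFactorsBisect outputRange 0 pvPrimes.length
  if lo = pvPrimes.length then []   -- Python: return None (excluded by Pre_)
  else if PySem.List.pyGetD pvPrimes (lo : Int) 0 = outputRange then
    PySem.List.slice pvPrimes (some ((lo : Int) - belowCount)) (some (lo : Int)) ++
    [outputRange] ++
    PySem.List.slice pvPrimes (some ((lo : Int) + 1)) (some ((lo : Int) + aboveCount + 1))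
  else
    PySem.List.slice pvPrimes (some ((lo : Int) - belowCount)) (some (lo : Int)) ++
    [outputRange] ++
    PySem.List.slice pvPrimes (some (lo : Int)) (some ((lo : Int) + aboveCount))

-- ===== PRECONDITION & SPEC =====
-- Pre_ excludes outputRange > 1021 (the largest table prime): there A's loop finds no
-- prime ≥ outputRange and falls off the end, returning None, which is not a list.
def Pre_selectFactors (outputRange : Int) (factorCount : Int) : Prop := outputRange ≤ 1021
instance (outputRange : Int) (factorCount : Int) : Decidable (Pre_selectFactors outputRange factorCount) := by unfold Pre_selectFactors; infer_instance
def pvWitness_selectFactors : Int × Int := (100, 4)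

def Spec_selectFactors (outputRange : Int) (factorCount : Int) (out : List Int) : Prop := out = selectFactors_alt outputRange factorCount
instance (outputRange : Int) (factorCount : Int) (out : List Int) : Decidable (Spec_selectFactors outputRange factorCount out) := by unfold Spec_selectFactors; infer_instance

-- ===== CLAIM (what is proved, stated in full; the proofs are below) =====
def Claim_equal_selectFactors : Prop := ∀ (outputRange : Int) (factorCount : Int), Dom_selectFactors outputRange factorCount → Pre_selectFactors outputRange factorCount → Spec_selectFactors outputRange factorCount (selectFactors outputRange factorCount)

-- ===== LEMMAS AND PROOFS =====

set_option maxRecDepth 8000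

lemma pvPrimes_len : pvPrimes.length = 172 := by decide

lemma pvPrimes_mono_succ : ∀ i : Nat, i < 171 → pvPrimes.getD i 0 ≤ pvPrimes.getD (i + 1) 0 := by
  decide

lemma pvPrimes_mono_add : ∀ (d i : Nat), i + d < 172 → pvPrimes.getD i 0 ≤ pvPrimes.getD (i + d) 0 := by
  intro d
  induction d with
  | zero => intro i _; exact le_refl _
  | succ d ih =>
    intro i h
    have h1 : pvPrimes.getD i 0 ≤ pvPrimes.getD (i + d) 0 := ih i (by omega)
    have h2 : pvPrimes.getD (i + d) 0 ≤ pvPrimes.getD (i + d + 1) 0 :=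
      pvPrimes_mono_succ (i + d) (by omega)
    have : i + (d + 1) = i + d + 1 := by omega
    rw [this]
    exact le_trans h1 h2

lemma pvPrimes_mono {i j : Nat} (hij : i ≤ j) (hj : j < 172) :
    pvPrimes.getD i 0 ≤ pvPrimes.getD j 0 := by
  have : j = i + (j - i) := by omega
  rw [this]
  exact pvPrimes_mono_add (j - i) i (by omega)

lemma bisect_inv (x : Int) : ∀ (fuel lo hi : Nat), hi - lo ≤ fuel → hi ≤ 172 → lo ≤ hi →
    (∀ j, j < lo → pvPrimes.getD j 0 < x) →
    (∀ j, hi ≤ j → j < 172 → x ≤ pvPrimes.getD j 0) →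
    lo ≤ selectFactorsBisect x lo hi ∧ selectFactorsBisect x lo hi ≤ hi ∧
    (∀ j, j < selectFactorsBisect x lo hi → pvPrimes.getD j 0 < x) ∧
    (∀ j, selectFactorsBisect x lo hi ≤ j → j < 172 → x ≤ pvPrimes.getD j 0) := by
  intro fuel
  induction fuel with
  | zero =>
    intro lo hi hf hhi hlh hlow hhigh
    have : lo = hi := by omega
    subst this
    rw [selectFactorsBisect]
    simp only [lt_irrefl, dite_false]
    exact ⟨le_refl _, le_refl _, hlow, hhigh⟩
  | succ fuel ih =>
    intro lo hi hf hhi hlh hlow hhigh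
    rw [selectFactorsBisect]
    by_cases h : lo < hi
    · simp only [h, dite_true]
      have hmidlt : (lo + hi) / 2 < hi := by omega
      have hmidge : lo ≤ (lo + hi) / 2 := by omega
      have hget : PySem.List.pyGetD pvPrimes (((lo + hi) / 2 : Nat) : Int) 0 =
          pvPrimes.getD ((lo + hi) / 2) 0 := by
        simp only [PySem.List.pyGetD_natCast]
      by_cases hc : PySem.List.pyGetD pvPrimes (((lo + hi) / 2 : Nat) : Int) 0 < x
      · simp only [hc, if_true]
        obtain ⟨a1, a2, a3, a4⟩ := ih ((lo + hi) / 2 + 1) hi (by omega) hhi (by omega)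
          (fun j hj => by
            have hle : pvPrimes.getD j 0 ≤ pvPrimes.getD ((lo + hi) / 2) 0 :=
              pvPrimes_mono (by omega) (by omega)
            rw [hget] at hc
            exact lt_of_le_of_lt hle hc)
          hhigh
        exact ⟨by omega, a2, a3, a4⟩
      · simp only [hc, if_false]
        obtain ⟨a1, a2, a3, a4⟩ := ih lo ((lo + hi) / 2) (by omega) (by omega) (by omega)
          hlow
          (fun j hj hj2 => by
            rw [hget] at hc
            rw [not_lt] at hc
            exact le_trans hc (pvPrimes_mono hj hj2))
        exact ⟨a1, by omega, a3, a4⟩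
    · simp only [h, dite_false]
      have : lo = hi := by omega
      subst this
      exact ⟨le_refl _, le_refl _, hlow, hhigh⟩

lemma aGo_hit (x ab bl : Int) : ∀ (l : List Int) (s : Int) (r : Nat), r < l.length →
    (∀ j, j < r → l.getD j 0 < x) → x ≤ l.getD r 0 →
    selectFactorsGo x ab bl (PySem.List.enumerate l s) =
      (if l.getD r 0 = x then
        PySem.List.slice pvPrimes (some (s + r - bl)) (some (s + r)) ++ [x] ++
        PySem.List.slice pvPrimes (some (s + r + 1)) (some (s + r + ab + 1))
      else
        PySem.List.slice pvPrimes (some (s + r - bl)) (some (s + r)) ++ [x] ++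
        PySem.List.slice pvPrimes (some (s + r)) (some (s + r + ab))) := by
  intro l
  induction l with
  | nil => intro s r hr; simp at hr
  | cons p t ih =>
    intro s r hr hlow hx
    rw [PySem.List.enumerate_cons, selectFactorsGo]
    cases r with
    | zero =>
      simp only [List.getD_cons_zero] at hx ⊢
      by_cases hpx : p = x
      · simp only [hpx, if_true]
        norm_num
      · have hgt : p > x := lt_of_le_of_ne hx (fun h => hpx h.symm)
        simp only [hpx, if_false, hgt, if_true]
        norm_num
    | succ rr =>
      have hplt : p < x := by
        have := hlow 0 (by omega)
        simpa using this
      have hpne : ¬ p = x := by intro h; omega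
      have hpgt : ¬ p > x := by omega
      simp only [hpne, if_false, hpgt]
      have := ih (s + 1) rr (by simpa using Nat.lt_of_succ_lt_succ hr)
        (fun j hj => by simpa using hlow (j + 1) (by omega))
        (by simpa using hx)
      rw [this]
      have harith : s + 1 + (rr : Int) = s + ((rr : Nat) + 1 : Nat) := by push_cast; ring
      rw [harith]
      simp

-- ===== VERDICT (by name: the statement is the Claim_ definition above) =====
theorem selectFactors_spec : Claim_equal_selectFactors := by
  intro x f _hdom hpre
  unfold Spec_selectFactors selectFactors selectFactors_alt
  simp only [pvPrimes_len]
  obtain ⟨h1, h2, h3, h4⟩ := bisect_inv x 172 0 172 (by omega) (by omega) (by omega)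
    (fun j hj => absurd hj (Nat.not_lt_zero j))
    (fun j hj hj2 => absurd (lt_of_le_of_lt hj hj2) (lt_irrefl _))
  by_cases hr : selectFactorsBisect x 0 172 = 172
  · exfalso
    have hlt := h3 171 (by omega)
    have hval : pvPrimes.getD 171 0 = 1021 := by decide
    rw [hval] at hlt
    unfold Pre_selectFactors at hpre
    omega
  · have hrlt : selectFactorsBisect x 0 172 < 172 := lt_of_le_of_ne h2 hr
    have hA := aGo_hit x (PySem.Int.floordiv f 2) (f - PySem.Int.floordiv f 2) pvPrimes 0
      (selectFactorsBisect x 0 172) (by rw [pvPrimes_len]; exact hrlt) h3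
      (h4 _ le_rfl hrlt)
    rw [hA]
    simp only [if_neg hr, PySem.List.pyGetD_natCast, zero_add]
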